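-- pv_equiv track=rewrite | github.com/ApsilonXi/OsnoviResheniy | lab1/lab1.py | hdmt_schedule
-- ===== SOURCE A (Python) =====
-- def hdmt_schedule(tasks, processors):
--     if processors % 2 != 0:
--         raise ValueError("Количество процессоров должно быть четным")
--
--     # Разделяем на два набора
--     half_size = processors // 2
--     load_a = [0] * half_size
--     load_b = [0] * half_size
--
--     # Первый уровень - распределение по двум процессорам
--     for i, task in enumerate(tasks):
--         if i % 2 == 0:
--             load_a[i // 2 % half_size] += task
--         else:
--             load_b[i // 2 % half_size] += task
--
--     return load_a + load_b
-- ===== SOURCE B (Python) =====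
-- def hdmt_schedule(tasks, processors):
--     if processors % 2 != 0:
--         raise ValueError("Количество процессоров должно быть четным")
--
--     half_size = processors // 2
--     load_a = [0] * half_size
--     load_b = [0] * half_size
--
--     # Even-indexed tasks feed the first bank, odd-indexed tasks the second,
--     # each striped round-robin over its bank's buckets.
--     for j, task in enumerate(tasks[0::2]):
--         load_a[j % half_size] += task
--     for j, task in enumerate(tasks[1::2]):
--         load_b[j % half_size] += task
--
--     return load_a + load_b
-- ===== Notes on version B (the rewrite author's own statement) =====
-- stated objective: alternative
-- what changed: B replaces A's single pass with a per-index parity branch (and the i//2 bucket arithmetic) by two separate loops over the even and odd stride slices tasks[0::2] and tasks[1::2], each striping its own bank with a plain j % half_size.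
import Mathlib
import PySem

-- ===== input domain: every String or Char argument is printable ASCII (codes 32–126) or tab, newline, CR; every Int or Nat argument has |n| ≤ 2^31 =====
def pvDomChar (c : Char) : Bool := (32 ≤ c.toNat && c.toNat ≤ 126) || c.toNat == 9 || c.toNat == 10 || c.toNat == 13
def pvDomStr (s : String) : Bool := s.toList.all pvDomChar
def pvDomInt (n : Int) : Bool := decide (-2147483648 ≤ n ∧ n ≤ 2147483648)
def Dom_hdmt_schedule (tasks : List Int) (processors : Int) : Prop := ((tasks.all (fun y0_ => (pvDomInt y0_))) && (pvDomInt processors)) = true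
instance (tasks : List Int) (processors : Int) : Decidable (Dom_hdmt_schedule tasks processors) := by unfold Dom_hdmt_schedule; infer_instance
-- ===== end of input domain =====

-- B replaces A's single parity-branching pass by two loops over the stride slices tasks[0::2] / tasks[1::2]; same values, same exceptions, no speed claim.

-- shared indexing helper: l[i] += t  (i a valid index on every admitted input)
def pvBump (l : List Int) (i : Int) (t : Int) : List Int :=
  l.set i.toNat (l.getD i.toNat 0 + t)

-- ===== PORT A =====
def hdmt_schedule (tasks : List Int) (processors : Int) : List Int :=
  let half := PySem.Int.floordiv processors 2
  let load_a := List.replicate half.toNat (0 : Int)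
  let load_b := List.replicate half.toNat (0 : Int)
  let st := (PySem.List.enumerate tasks 0).foldl
    (fun (st : List Int × List Int) p =>
      if PySem.Int.mod p.1 2 = 0 then
        (pvBump st.1 (PySem.Int.mod (PySem.Int.floordiv p.1 2) half) p.2, st.2)
      else
        (st.1, pvBump st.2 (PySem.Int.mod (PySem.Int.floordiv p.1 2) half) p.2))
    (load_a, load_b)
  st.1 ++ st.2

-- ===== PORT B =====
def hdmt_schedule_alt (tasks : List Int) (processors : Int) : List Int :=
  let half := PySem.Int.floordiv processors 2
  let load_a0 := List.replicate half.toNat (0 : Int)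
  let load_b0 := List.replicate half.toNat (0 : Int)
  -- tasks[0::2] / tasks[1::2]; step 2 ≠ 0, so slice? always returns (getD [] is unreachable)
  let evs := (PySem.List.slice? tasks (some 0) none 2).getD []
  let ods := (PySem.List.slice? tasks (some 1) none 2).getD []
  let load_a := (PySem.List.enumerate evs 0).foldl
    (fun (l : List Int) p => pvBump l (PySem.Int.mod p.1 half) p.2) load_a0
  let load_b := (PySem.List.enumerate ods 0).foldl
    (fun (l : List Int) p => pvBump l (PySem.Int.mod p.1 half) p.2) load_b0
  load_a ++ load_b

-- ===== PRECONDITION & SPEC =====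
-- A raises ValueError on odd processors, and ZeroDivisionError/IndexError on even processors ≤ 0 with nonempty tasks; Pre_ is exactly where A returns (B raises the same way there).
def Pre_hdmt_schedule (tasks : List Int) (processors : Int) : Prop :=
  PySem.Int.mod processors 2 = 0 ∧ (0 < processors ∨ tasks = [])
instance (tasks : List Int) (processors : Int) : Decidable (Pre_hdmt_schedule tasks processors) := by unfold Pre_hdmt_schedule; infer_instance

def pvWitness_hdmt_schedule : List Int × Int := ([3, 1, 4, 1, 5, 9, 2], 4)

def Spec_hdmt_schedule (tasks : List Int) (processors : Int) (out : List Int) : Prop := out = hdmt_schedule_alt tasks processors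
instance (tasks : List Int) (processors : Int) (out : List Int) : Decidable (Spec_hdmt_schedule tasks processors out) := by unfold Spec_hdmt_schedule; infer_instance

-- ===== CLAIM (what is proved, stated in full; the proofs are below) =====
def Claim_equal_hdmt_schedule : Prop := ∀ (tasks : List Int) (processors : Int), Dom_hdmt_schedule tasks processors → Pre_hdmt_schedule tasks processors → Spec_hdmt_schedule tasks processors (hdmt_schedule tasks processors)

-- ===== LEMMAS AND PROOFS =====

-- even- and odd-indexed elements of a list
def pvEvens : List Int → List Int
  | [] => []
  | [t] => [t]
  | t1 :: _ :: ts => t1 :: pvEvens ts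

def pvOdds : List Int → List Int
  | [] => []
  | [_] => []
  | _ :: t2 :: ts => t2 :: pvOdds ts

-- contribution of the tail `ts` (first element carrying index s) of A's loop to bucket k
def cEven (H : Nat) : List Int → Nat → Nat → Int
  | [], _, _ => 0
  | t :: ts, s, k => (if s % 2 = 0 ∧ s / 2 % H = k then t else 0) + cEven H ts (s + 1) k

def cOdd (H : Nat) : List Int → Nat → Nat → Int
  | [], _, _ => 0
  | t :: ts, s, k => (if s % 2 = 1 ∧ s / 2 % H = k then t else 0) + cOdd H ts (s + 1) k

-- contribution of a B-side loop over `es` (first element carrying index s) to bucket k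
def cBucket (H : Nat) : List Int → Nat → Nat → Int
  | [], _, _ => 0
  | t :: ts, s, k => (if s % H = k then t else 0) + cBucket H ts (s + 1) k

theorem pvBump_map_range (H : Nat) (f : Nat → Int) (i : Nat) (hi : i < H) (t : Int) :
    pvBump ((List.range H).map f) (i : Int) t
      = (List.range H).map (fun k => if k = i then f k + t else f k) := by
  unfold pvBump
  rw [Int.toNat_natCast]
  have hgd : ((List.range H).map f).getD i 0 = f i := by
    simp [List.getD, hi]
  rw [hgd]
  apply List.ext_getElem
  · simp
  · intro k hk hk'
    have hkH : k < H := by simpa using hk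
    simp only [List.getElem_set, List.getElem_map, List.getElem_range]
    by_cases h : i = k
    · simp [h]
    · simp [h, Ne.symm h]

theorem foldA_char (H : Nat) (hH : 0 < H) (ts : List Int) : ∀ (s : Nat) (f g : Nat → Int),
    (PySem.List.enumerate ts (s : Int)).foldl
      (fun (st : List Int × List Int) p =>
        if PySem.Int.mod p.1 2 = 0 then
          (pvBump st.1 (PySem.Int.mod (PySem.Int.floordiv p.1 2) (H : Int)) p.2, st.2)
        else
          (st.1, pvBump st.2 (PySem.Int.mod (PySem.Int.floordiv p.1 2) (H : Int)) p.2))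
      ((List.range H).map f, (List.range H).map g)
    = ((List.range H).map (fun k => f k + cEven H ts s k),
       (List.range H).map (fun k => g k + cOdd H ts s k)) := by
  induction ts with
  | nil => intro s f g; simp [PySem.List.enumerate_nil, cEven, cOdd]
  | cons t ts ih =>
    intro s f g
    rw [PySem.List.enumerate_cons, List.foldl_cons]
    have hmod2 : PySem.Int.mod (s : Int) 2 = ((s % 2 : Nat) : Int) := by
      exact_mod_cast PySem.Int.mod_natCast s 2
    have hdiv2 : PySem.Int.floordiv (s : Int) 2 = ((s / 2 : Nat) : Int) := by
      exact_mod_cast PySem.Int.floordiv_natCast s 2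
    have hmodH : PySem.Int.mod ((s / 2 : Nat) : Int) (H : Int) = ((s / 2 % H : Nat) : Int) :=
      PySem.Int.mod_natCast (s / 2) H
    have hlt : s / 2 % H < H := Nat.mod_lt _ hH
    by_cases hpar : s % 2 = 0
    · simp only [hmod2, hdiv2, hmodH, hpar, Nat.cast_zero, if_true]
      rw [pvBump_map_range H f _ hlt t]
      have : ((s : Int) + 1) = ((s + 1 : Nat) : Int) := by push_cast; ring
      rw [this, ih (s + 1)]
      simp only [Prod.mk.injEq]
      refine ⟨?_, ?_⟩
      · apply List.map_congr_left
        intro k hk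
        simp only [cEven]
        by_cases hkk : k = s / 2 % H
        · simp [hkk, hpar]; ring
        · simp [hkk, hpar]; intro h; exact absurd h.symm hkk
      · apply List.map_congr_left
        intro k hk
        simp only [cOdd, hpar]
        simp
    · have hpar1 : s % 2 = 1 := Nat.mod_two_ne_zero.mp hpar
      have hne : ((s % 2 : Nat) : Int) ≠ 0 := by rw [hpar1]; decide
      simp only [hmod2, hdiv2, hmodH]
      rw [if_neg hne, pvBump_map_range H g _ hlt t]
      have : ((s : Int) + 1) = ((s + 1 : Nat) : Int) := by push_cast; ring
      rw [this, ih (s + 1)]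
      simp only [Prod.mk.injEq]
      refine ⟨?_, ?_⟩
      · apply List.map_congr_left
        intro k hk
        simp only [cEven, hpar1]
        simp
      · apply List.map_congr_left
        intro k hk
        simp only [cOdd]
        by_cases hkk : k = s / 2 % H
        · simp [hkk, hpar1]; ring
        · simp [hkk, hpar1]; intro h; exact absurd h.symm hkk

theorem foldB_char (H : Nat) (hH : 0 < H) (es : List Int) : ∀ (s : Nat) (f : Nat → Int),
    (PySem.List.enumerate es (s : Int)).foldl
      (fun (l : List Int) p => pvBump l (PySem.Int.mod p.1 (H : Int)) p.2)
      ((List.range H).map f)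
    = (List.range H).map (fun k => f k + cBucket H es s k) := by
  induction es with
  | nil => intro s f; simp [PySem.List.enumerate_nil, cBucket]
  | cons t ts ih =>
    intro s f
    rw [PySem.List.enumerate_cons, List.foldl_cons]
    have hmodH : PySem.Int.mod (s : Int) (H : Int) = ((s % H : Nat) : Int) :=
      PySem.Int.mod_natCast s H
    have hlt : s % H < H := Nat.mod_lt _ hH
    simp only [hmodH]
    rw [pvBump_map_range H f _ hlt t]
    have : ((s : Int) + 1) = ((s + 1 : Nat) : Int) := by push_cast; ring
    rw [this, ih (s + 1)]
    apply List.map_congr_left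
    intro k hk
    simp only [cBucket]
    by_cases hkk : k = s % H
    · simp [hkk]; ring
    · simp [hkk]; intro h; exact absurd h.symm hkk

-- A's even contribution at index 2*s is B's bucket contribution over the even slice
theorem cEven_evens (H : Nat) (ts : List Int) : ∀ (s k : Nat),
    cEven H ts (2 * s) k = cBucket H (pvEvens ts) s k := by
  induction ts using pvEvens.induct with
  | case1 => intro s k; simp [cEven, pvEvens, cBucket]
  | case2 t =>
    intro s k
    have h1 : (2 * s) % 2 = 0 := by omega
    have h2 : (2 * s) / 2 = s := by omega
    simp [cEven, pvEvens, cBucket, h1, h2]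
  | case3 t1 t2 ts ih =>
    intro s k
    have h1 : (2 * s) % 2 = 0 := by omega
    have h2 : (2 * s) / 2 = s := by omega
    have h3 : (2 * s + 1) % 2 = 1 := by omega
    have h4 : (2 * s + 1 + 1) = 2 * (s + 1) := by omega
    simp only [cEven, pvEvens, cBucket, h1, h2, h3, h4, ih (s + 1) k]
    simp

theorem cOdd_odds (H : Nat) (ts : List Int) : ∀ (s k : Nat),
    cOdd H ts (2 * s) k = cBucket H (pvOdds ts) s k := by
  induction ts using pvOdds.induct with
  | case1 => intro s k; simp [cOdd, pvOdds, cBucket]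
  | case2 t =>
    intro s k
    have h1 : (2 * s) % 2 = 0 := by omega
    simp [cOdd, pvOdds, cBucket, h1]
  | case3 t1 t2 ts ih =>
    intro s k
    have h1 : (2 * s) % 2 = 0 := by omega
    have h3 : (2 * s + 1) % 2 = 1 := by omega
    have h2 : (2 * s + 1) / 2 = s := by omega
    have h4 : (2 * s + 1 + 1) = 2 * (s + 1) := by omega
    simp only [cOdd, pvOdds, cBucket, h1, h2, h3, h4, ih (s + 1) k]
    simp

-- the stride-2 slices compute pvEvens / pvOdds
theorem filterMap_evens (xs : List Int) :
    (List.range ((xs.length + 1) / 2)).filterMap (fun k => xs[2 * k]?) = pvEvens xs := by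
  induction xs using pvEvens.induct with
  | case1 => simp [pvEvens]
  | case2 t => simp [pvEvens]
  | case3 t1 t2 ts ih =>
    have hlen : ((t1 :: t2 :: ts).length + 1) / 2 = (ts.length + 1) / 2 + 1 := by
      simp; omega
    rw [hlen, List.range_succ_eq_map, List.filterMap_cons, List.filterMap_map]
    simp only [Nat.mul_zero, List.getElem?_cons_zero]
    have : (fun k => (t1 :: t2 :: ts)[2 * k]?) ∘ Nat.succ = fun k => ts[2 * k]? := by
      funext k
      have : 2 * Nat.succ k = 2 * k + 1 + 1 := by omega
      simp [Function.comp, this]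
    rw [this, ih]
    rfl

theorem filterMap_odds (xs : List Int) :
    (List.range (xs.length / 2)).filterMap (fun k => xs[2 * k + 1]?) = pvOdds xs := by
  induction xs using pvOdds.induct with
  | case1 => simp [pvOdds]
  | case2 t => simp [pvOdds]
  | case3 t1 t2 ts ih =>
    have hlen : (t1 :: t2 :: ts).length / 2 = ts.length / 2 + 1 := by
      simp only [List.length_cons]; omega
    rw [hlen, List.range_succ_eq_map, List.filterMap_cons, List.filterMap_map]
    have hcomp : ((fun k => (t1 :: t2 :: ts)[2 * k + 1]?) ∘ Nat.succ) = fun k => ts[2 * k + 1]? := by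
      funext k
      have h : 2 * Nat.succ k + 1 = 2 * k + 1 + 2 := by omega
      simp [Function.comp, h]
    rw [hcomp, ih]
    rfl

theorem slice_zero_two (xs : List Int) :
    (PySem.List.slice? xs (some 0) none 2).getD [] = pvEvens xs := by
  have hsi : PySem.List.sliceIndices xs.length (some 0) none 2 = (0, (xs.length : Int), 2) := by
    simp [PySem.List.sliceIndices]
  simp only [PySem.List.slice?, hsi]
  norm_num
  have hcnt : (if 0 < xs.length then (((xs.length : Int) + 2 - 1) / 2).toNat else 0)
      = (xs.length + 1) / 2 := by split_ifs with h <;> omega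
  rw [hcnt, ← filterMap_evens xs]
  apply List.filterMap_congr
  intro k _
  have h1 : ((2 : Int) * (k : Int)).toNat = 2 * k := by omega
  rw [h1]

theorem slice_one_two (xs : List Int) :
    (PySem.List.slice? xs (some 1) none 2).getD [] = pvOdds xs := by
  rcases xs with _ | ⟨t, ts⟩
  · decide
  · have hsi : PySem.List.sliceIndices (t :: ts).length (some 1) none 2
        = (1, ((t :: ts).length : Int), 2) := by
      simp [PySem.List.sliceIndices]
    simp only [PySem.List.slice?, hsi]
    norm_num
    have hcnt : (if 0 < ts.length then (((ts.length : Int) + 2 - 1) / 2).toNat else 0)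
        = (ts.length + 1) / 2 := by split_ifs with h <;> omega
    rw [hcnt]
    have := filterMap_odds (t :: ts)
    rw [show (t :: ts).length / 2 = (ts.length + 1) / 2 by simp [Nat.succ_div]] at this
    rw [← this]
    apply List.filterMap_congr
    intro k _
    have h1 : ((1 : Int) + (2 : Int) * (k : Int)).toNat = 2 * k + 1 := by omega
    rw [h1]

-- ===== VERDICT (by name: the statement is the Claim_ definition above) =====
theorem hdmt_schedule_spec : Claim_equal_hdmt_schedule := by
  intro tasks processors _hdom hpre
  obtain ⟨heven, hrest⟩ := hpre
  unfold Spec_hdmt_schedule hdmt_schedule hdmt_schedule_alt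
  rcases hrest with hpos | hnil
  · have h2 : (2 : Int) ≤ processors := by
      by_contra h
      have : processors = 1 := by omega
      rw [this] at heven; simp [PySem.Int.mod] at heven
    have hfd : PySem.Int.floordiv processors 2 = processors / 2 :=
      PySem.Int.floordiv_eq_ediv_of_pos (by omega)
    have hpos' : 0 < PySem.Int.floordiv processors 2 := by
      rw [hfd]; omega
    set H : Nat := (PySem.Int.floordiv processors 2).toNat with hHdef
    have hcast : PySem.Int.floordiv processors 2 = (H : Int) := by
      rw [hHdef, Int.toNat_of_nonneg (le_of_lt hpos')]
    have hH : 0 < H := by omega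
    simp only [hcast, Int.toNat_natCast]
    have hrepl : List.replicate H (0 : Int) = (List.range H).map (fun _ => (0 : Int)) := by
      simp [List.map_const']
    have hfoldA := foldA_char H hH tasks 0 (fun _ => (0 : Int)) (fun _ => (0 : Int))
    simp only [Nat.cast_zero] at hfoldA
    rw [hrepl, hfoldA]
    rw [slice_zero_two, slice_one_two]
    have hfe := foldB_char H hH (pvEvens tasks) 0 (fun _ => (0 : Int))
    have hfo := foldB_char H hH (pvOdds tasks) 0 (fun _ => (0 : Int))
    simp only [Nat.cast_zero] at hfe hfo
    rw [hfe, hfo]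
    have he := fun k => cEven_evens H tasks 0 k
    have ho := fun k => cOdd_odds H tasks 0 k
    simp only [Nat.mul_zero] at he ho
    congr 1
    · exact List.map_congr_left (fun k _ => by rw [he k])
    · exact List.map_congr_left (fun k _ => by rw [ho k])
  · subst hnil
    simp [PySem.List.enumerate_nil, slice_zero_two, slice_one_two, pvEvens, pvOdds]
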